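-- pv_equiv track=rewrite | github.com/rootcell-ai/rootcell | proxy/agent_spy.py | is_bedrock_runtime_host
-- ===== SOURCE A (Python) =====
-- import fnmatch
--
-- def is_bedrock_runtime_host(host: str | None) -> bool:
--     if not host:
--         return False
--     host = host.split(":", 1)[0].strip(".").lower()
--     patterns = (
--         "bedrock-runtime.*.amazonaws.com",
--         "bedrock-runtime-fips.*.amazonaws.com",
--         "*.bedrock-runtime.*.amazonaws.com",
--         "*.bedrock-runtime-fips.*.amazonaws.com",
--         "bedrock-runtime.*.amazonaws.com.cn",
--         "bedrock-runtime-fips.*.amazonaws.com.cn",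
--         "*.bedrock-runtime.*.amazonaws.com.cn",
--         "*.bedrock-runtime-fips.*.amazonaws.com.cn",
--     )
--     return any(fnmatch.fnmatchcase(host, pattern) for pattern in patterns)
-- ===== SOURCE B (Python) =====
-- def is_bedrock_runtime_host(host: str | None) -> bool:
--     if not host:
--         return False
--     h = host.split(":", 1)[0].strip(".").lower()
--     for suffix in (".amazonaws.com", ".amazonaws.com.cn"):
--         if h.endswith(suffix):
--             front = h[: len(h) - len(suffix)]
--             for label in ("bedrock-runtime", "bedrock-runtime-fips"):
--                 if front.startswith(label + ".") or ("." + label + ".") in front: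
--                     return True
--     return False
-- ===== Notes on version B (the rewrite author's own statement) =====
-- stated objective: faster
-- what changed: Replaces the 8-way any(fnmatch.fnmatchcase) glob-matching loop by direct string structure tests: check the amazonaws com/com.cn suffix, cut it off, and test the remaining front for a leading or embedded dot-delimited bedrock-runtime / bedrock-runtime-fips label.
import Mathlib
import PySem

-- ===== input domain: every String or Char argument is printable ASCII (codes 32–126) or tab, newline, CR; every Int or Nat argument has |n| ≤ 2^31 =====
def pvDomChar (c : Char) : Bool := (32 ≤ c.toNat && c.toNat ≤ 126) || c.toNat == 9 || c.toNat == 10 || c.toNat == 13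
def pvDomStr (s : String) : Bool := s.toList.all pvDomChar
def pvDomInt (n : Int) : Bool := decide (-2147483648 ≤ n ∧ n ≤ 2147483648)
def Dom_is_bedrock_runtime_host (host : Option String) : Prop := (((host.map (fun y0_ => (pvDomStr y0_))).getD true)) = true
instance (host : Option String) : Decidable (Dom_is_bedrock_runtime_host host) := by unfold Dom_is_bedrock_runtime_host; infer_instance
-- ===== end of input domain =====

-- B replaces A's 8-pattern any(fnmatch) glob loop by direct suffix/prefix/substring
-- structure tests on the normalized host (measured faster in a timing run).

-- host.split(":", 1)[0].strip(".").lower()  (the normalization line both versions share verbatim)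
def pyNormHost (s : String) : List Char :=
  PySem.Chars.lower
    (PySem.Chars.stripChars
      (((PySem.Chars.splitMax? s.toList [':'] 1).getD []).headD []) ['.'])

-- ===== PORT A =====
-- fnmatch.fnmatchcase for patterns built from '*' and ordinary characters only
-- (exact for A's eight patterns, which contain no '?', '[' or ']').
def globMatch : List Char → List Char → Bool
  | [], s => s.isEmpty
  | p :: ps, s =>
    if p = '*' then
      globMatch ps s ||
        (match s with
          | [] => false
          | _ :: s' => globMatch (p :: ps) s')
    else
      match s with
      | [] => false
      | c :: s' => p == c && globMatch ps s'
termination_by ps s => (ps.length, s.length)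

def bedrockPatterns : List (List Char) :=
  [ "bedrock-runtime.*.amazonaws.com".toList,
    "bedrock-runtime-fips.*.amazonaws.com".toList,
    "*.bedrock-runtime.*.amazonaws.com".toList,
    "*.bedrock-runtime-fips.*.amazonaws.com".toList,
    "bedrock-runtime.*.amazonaws.com.cn".toList,
    "bedrock-runtime-fips.*.amazonaws.com.cn".toList,
    "*.bedrock-runtime.*.amazonaws.com.cn".toList,
    "*.bedrock-runtime-fips.*.amazonaws.com.cn".toList ]

def is_bedrock_runtime_host (host : Option String) : Bool :=
  match host with
  | none => false
  | some s =>
    if s.toList.isEmpty then false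
    else
      let h := pyNormHost s
      bedrockPatterns.any (fun pat => globMatch pat h)

-- ===== PORT B =====
def bedrockSuffixCheck (h : List Char) (suffix : List Char) : Bool :=
  if PySem.Chars.endswith h suffix then
    let front := PySem.Chars.slice h none (some ((h.length : Int) - (suffix.length : Int)))
    ["bedrock-runtime".toList, "bedrock-runtime-fips".toList].any fun label =>
      PySem.Chars.startswith front (label ++ ['.']) ||
        PySem.Chars.isIn ('.' :: (label ++ ['.'])) front
  else false

def is_bedrock_runtime_host_alt (host : Option String) : Bool :=
  match host with
  | none => false
  | some s =>
    if s.toList.isEmpty then false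
    else
      let h := pyNormHost s
      [".amazonaws.com".toList, ".amazonaws.com.cn".toList].any (bedrockSuffixCheck h)

-- ===== PRECONDITION & SPEC =====
def Spec_is_bedrock_runtime_host (host : Option String) (out : Bool) : Prop := out = is_bedrock_runtime_host_alt host
instance (host : Option String) (out : Bool) : Decidable (Spec_is_bedrock_runtime_host host out) := by unfold Spec_is_bedrock_runtime_host; infer_instance

-- ===== CLAIM (what is proved, stated in full; the proofs are below) =====
def Claim_equal_is_bedrock_runtime_host : Prop := ∀ (host : Option String), Dom_is_bedrock_runtime_host host → Spec_is_bedrock_runtime_host host (is_bedrock_runtime_host host)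

-- ===== LEMMAS AND PROOFS =====

theorem glob_star_cons (ps : List Char) (c : Char) (s : List Char) :
    globMatch ('*'::ps) (c::s) = (globMatch ps (c::s) || globMatch ('*'::ps) s) := by
  simp [globMatch]

theorem glob_star_nil (ps : List Char) : globMatch ('*'::ps) [] = globMatch ps [] := by
  simp [globMatch]

theorem glob_lit_cons (c : Char) (hc : c ≠ '*') (ps : List Char) (d : Char) (s : List Char) :
    globMatch (c::ps) (d::s) = (c == d && globMatch ps s) := by
  simp [globMatch, hc]

theorem glob_lit_nil (c : Char) (hc : c ≠ '*') (ps : List Char) :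
    globMatch (c::ps) [] = false := by
  simp [globMatch, hc]

theorem glob_nil (s : List Char) : globMatch [] s = true ↔ s = [] := by
  cases s <;> simp [globMatch]

theorem glob_cons_lit (c : Char) (hc : c ≠ '*') (ps s : List Char) :
    globMatch (c :: ps) s = true ↔ ∃ s', s = c :: s' ∧ globMatch ps s' = true := by
  cases s with
  | nil => simp [glob_lit_nil c hc]
  | cons d s' =>
    rw [glob_lit_cons c hc]
    simp only [Bool.and_eq_true, beq_iff_eq, List.cons.injEq]
    constructor
    · rintro ⟨rfl, hg⟩; exact ⟨s', ⟨rfl, rfl⟩, hg⟩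
    · rintro ⟨t, ⟨rfl, rfl⟩, hg⟩; exact ⟨rfl, hg⟩

theorem glob_lit_append (l : List Char) (hl : '*' ∉ l) (ps s : List Char) :
    globMatch (l ++ ps) s = true ↔ ∃ s', s = l ++ s' ∧ globMatch ps s' = true := by
  induction l generalizing s with
  | nil => simp
  | cons c l ih =>
    have hc : c ≠ '*' := fun h => hl (h ▸ List.mem_cons_self ..)
    have hl' : '*' ∉ l := fun h => hl (List.mem_cons_of_mem _ h)
    rw [List.cons_append, glob_cons_lit c hc]
    constructor
    · rintro ⟨t, rfl, h2⟩
      rcases (ih hl' t).mp h2 with ⟨s', rfl, h3⟩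
      exact ⟨s', rfl, h3⟩
    · rintro ⟨s', rfl, h3⟩
      exact ⟨l ++ s', rfl, (ih hl' _).mpr ⟨s', rfl, h3⟩⟩

theorem glob_star (ps s : List Char) :
    globMatch ('*' :: ps) s = true ↔ ∃ v, v <:+ s ∧ globMatch ps v = true := by
  induction s with
  | nil =>
    rw [glob_star_nil]
    constructor
    · intro h; exact ⟨[], List.suffix_refl _, h⟩
    · rintro ⟨v, hv, h⟩; rwa [List.suffix_nil.mp hv] at h
  | cons c s ih =>
    rw [glob_star_cons, Bool.or_eq_true]
    constructor
    · rintro (h | h)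
      · exact ⟨c :: s, List.suffix_refl _, h⟩
      · rcases ih.mp h with ⟨v, hv, hg⟩
        exact ⟨v, hv.trans (List.suffix_cons c s), hg⟩
    · rintro ⟨v, hv, hg⟩
      rcases List.suffix_cons_iff.mp hv with h | h
      · exact Or.inl (h ▸ hg)
      · exact Or.inr (ih.mpr ⟨v, h, hg⟩)

theorem glob_lit (l : List Char) (hl : '*' ∉ l) (s : List Char) :
    globMatch l s = true ↔ s = l := by
  have := glob_lit_append l hl [] s
  simp only [List.append_nil] at this
  rw [this]
  constructor
  · rintro ⟨s', rfl, h⟩; rw [glob_nil] at h; simp [h]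
  · rintro rfl; exact ⟨[], by simp, by simp [glob_nil]⟩

-- pattern  l1 ++ "*" ++ l2  (anchored both ends)
theorem glob_mid (l1 l2 : List Char) (h1 : '*' ∉ l1) (h2 : '*' ∉ l2) (s : List Char) :
    globMatch (l1 ++ '*' :: l2) s = true ↔ ∃ m, s = l1 ++ m ++ l2 := by
  rw [glob_lit_append l1 h1]
  constructor
  · rintro ⟨t, rfl, hg⟩
    rcases (glob_star l2 t).mp hg with ⟨v, ⟨m, rfl⟩, hgl⟩
    rw [glob_lit l2 h2] at hgl
    exact ⟨m, by simp [hgl, List.append_assoc]⟩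
  · rintro ⟨m, rfl⟩
    refine ⟨m ++ l2, by simp [List.append_assoc], ?_⟩
    exact (glob_star l2 _).mpr ⟨l2, ⟨m, rfl⟩, (glob_lit l2 h2 l2).mpr rfl⟩

-- pattern  "*" ++ l1 ++ "*" ++ l2
theorem glob_star_mid (l1 l2 : List Char) (h1 : '*' ∉ l1) (h2 : '*' ∉ l2) (s : List Char) :
    globMatch ('*' :: (l1 ++ '*' :: l2)) s = true ↔ ∃ u m, s = u ++ l1 ++ m ++ l2 := by
  rw [glob_star]
  constructor
  · rintro ⟨v, ⟨u, rfl⟩, hg⟩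
    rcases (glob_mid l1 l2 h1 h2 v).mp hg with ⟨m, rfl⟩
    exact ⟨u, m, by simp [List.append_assoc]⟩
  · rintro ⟨u, m, rfl⟩
    exact ⟨l1 ++ m ++ l2, ⟨u, by simp [List.append_assoc]⟩,
      (glob_mid l1 l2 h1 h2 _).mpr ⟨m, rfl⟩⟩

theorem front_of_suffix (h f l2 : List Char) (hf : h = f ++ l2) :
    h.take (h.length - l2.length) = f := by
  subst hf; simp

theorem mid_iff (l1 l2 h : List Char) :
    (∃ m, h = l1 ++ m ++ l2) ↔ l2 <:+ h ∧ l1 <+: h.take (h.length - l2.length) := by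
  constructor
  · rintro ⟨m, rfl⟩
    refine ⟨⟨l1 ++ m, by simp [List.append_assoc]⟩, ?_⟩
    rw [front_of_suffix _ (l1 ++ m) l2 (by simp [List.append_assoc])]
    exact ⟨m, rfl⟩
  · rintro ⟨⟨f, hf⟩, hp⟩
    rw [front_of_suffix h f l2 hf.symm] at hp
    rcases hp with ⟨m, rfl⟩
    exact ⟨m, by simp [← hf, List.append_assoc]⟩

theorem star_mid_iff (l1 l2 h : List Char) :
    (∃ u m, h = u ++ l1 ++ m ++ l2) ↔ l2 <:+ h ∧ l1 <:+: h.take (h.length - l2.length) := by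
  constructor
  · rintro ⟨u, m, rfl⟩
    refine ⟨⟨u ++ l1 ++ m, by simp [List.append_assoc]⟩, ?_⟩
    rw [front_of_suffix _ (u ++ l1 ++ m) l2 (by simp [List.append_assoc])]
    exact ⟨u, m, by simp [List.append_assoc]⟩
  · rintro ⟨⟨f, hf⟩, hi⟩
    rw [front_of_suffix h f l2 hf.symm] at hi
    rcases hi with ⟨u, m, rfl⟩
    exact ⟨u, m, by simp [← hf, List.append_assoc]⟩

-- the four patterns sharing one suffix  ↔  one iteration of B's outer loop
theorem family_eq (h suffix : List Char) (hsuf : '*' ∉ suffix) :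
    ((globMatch ("bedrock-runtime.".toList ++ '*' :: suffix) h ||
      globMatch ('*' :: (".bedrock-runtime.".toList ++ '*' :: suffix)) h) ||
     (globMatch ("bedrock-runtime-fips.".toList ++ '*' :: suffix) h ||
      globMatch ('*' :: (".bedrock-runtime-fips.".toList ++ '*' :: suffix)) h))
    = bedrockSuffixCheck h suffix := by
  have e1 : "bedrock-runtime".toList ++ ['.'] = "bedrock-runtime.".toList := by decide
  have e3 : "bedrock-runtime-fips".toList ++ ['.'] = "bedrock-runtime-fips.".toList := by decide
  rw [Bool.eq_iff_iff, Bool.or_eq_true, Bool.or_eq_true, Bool.or_eq_true,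
    glob_mid _ _ (by decide) hsuf, glob_star_mid _ _ (by decide) hsuf,
    glob_mid _ _ (by decide) hsuf, glob_star_mid _ _ (by decide) hsuf,
    mid_iff, star_mid_iff, mid_iff, star_mid_iff]
  unfold bedrockSuffixCheck
  by_cases hend : PySem.Chars.endswith h suffix = true
  · have hs : suffix <:+ h := (PySem.Chars.endswith_iff h suffix).mp hend
    have hlen : suffix.length ≤ h.length := hs.length_le
    have hslice : PySem.Chars.slice h none (some ((h.length : Int) - (suffix.length : Int)))
        = h.take (h.length - suffix.length) := by
      have hc : ((h.length : Int) - (suffix.length : Int)) = ((h.length - suffix.length : Nat) : Int) := by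
        omega
      rw [hc, PySem.Chars.slice_eq_listSlice, PySem.List.slice_to_natCast]
    rw [if_pos hend]
    simp only [List.any_cons, List.any_nil, Bool.or_false, Bool.or_eq_true,
      PySem.Chars.startswith_iff, PySem.Chars.isIn_iff_infix, hslice, e1, e3]
    tauto
  · rw [if_neg hend]
    have hns : ¬ suffix <:+ h := fun hs => hend ((PySem.Chars.endswith_iff h suffix).mpr hs)
    simp [hns]

set_option maxHeartbeats 1000000 in
theorem core_eq (h : List Char) :
    bedrockPatterns.any (fun pat => globMatch pat h)
      = [".amazonaws.com".toList, ".amazonaws.com.cn".toList].any (bedrockSuffixCheck h) := by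
  have p1 : "bedrock-runtime.*.amazonaws.com".toList
      = "bedrock-runtime.".toList ++ '*' :: ".amazonaws.com".toList := by decide
  have p2 : "bedrock-runtime-fips.*.amazonaws.com".toList
      = "bedrock-runtime-fips.".toList ++ '*' :: ".amazonaws.com".toList := by decide
  have p3 : "*.bedrock-runtime.*.amazonaws.com".toList
      = '*' :: (".bedrock-runtime.".toList ++ '*' :: ".amazonaws.com".toList) := by decide
  have p4 : "*.bedrock-runtime-fips.*.amazonaws.com".toList
      = '*' :: (".bedrock-runtime-fips.".toList ++ '*' :: ".amazonaws.com".toList) := by decide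
  have q1 : "bedrock-runtime.*.amazonaws.com.cn".toList
      = "bedrock-runtime.".toList ++ '*' :: ".amazonaws.com.cn".toList := by decide
  have q2 : "bedrock-runtime-fips.*.amazonaws.com.cn".toList
      = "bedrock-runtime-fips.".toList ++ '*' :: ".amazonaws.com.cn".toList := by decide
  have q3 : "*.bedrock-runtime.*.amazonaws.com.cn".toList
      = '*' :: (".bedrock-runtime.".toList ++ '*' :: ".amazonaws.com.cn".toList) := by decide
  have q4 : "*.bedrock-runtime-fips.*.amazonaws.com.cn".toList
      = '*' :: (".bedrock-runtime-fips.".toList ++ '*' :: ".amazonaws.com.cn".toList) := by decide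
  have f1 := family_eq h ".amazonaws.com".toList (by decide)
  have f2 := family_eq h ".amazonaws.com.cn".toList (by decide)
  simp only [bedrockPatterns, List.any_cons, List.any_nil, Bool.or_false,
    p1, p2, p3, p4, q1, q2, q3, q4]
  rw [← f1, ← f2]
  ac_rfl

-- ===== VERDICT (by name: the statement is the Claim_ definition above) =====
theorem is_bedrock_runtime_host_spec : Claim_equal_is_bedrock_runtime_host := by
  intro host _
  unfold Spec_is_bedrock_runtime_host is_bedrock_runtime_host is_bedrock_runtime_host_alt
  match host with
  | none => rfl
  | some s =>
    by_cases he : s.toList.isEmpty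
    · simp [he]
    · simp only [he, Bool.false_eq_true, if_false]
      exact core_eq (pyNormHost s)
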